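-- pv_equiv track=rewrite | github.com/marcel-krause/advent-of-code | 2024/Day20.py | check_cheats
-- ===== SOURCE A (Python) =====
-- def get_diamond_neighbors(node, N, waypoint_distances):
--     x, y = node
--     neighbors = set()
--
--     for dx in range(-N, N+1):
--         for dy in {-(N-abs(dx)), (N-abs(dx))}:
--             new_node = (x+dx, y+dy)
--             if new_node in waypoint_distances and waypoint_distances[node] > waypoint_distances[new_node]:
--                 neighbors.add(new_node)
--
--     return neighbors
--
-- def check_cheats(waypoint_distances, SAVINGS_TARGET, CHEAT_LENGTH):
--     valid_cheats = 0
--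
--     for cheat_start_node in waypoint_distances.keys():
--
--         cheat_end_nodes = set()
--         for N in range(2, CHEAT_LENGTH+1):
--             for cheat_end_node in get_diamond_neighbors(cheat_start_node, N, waypoint_distances):
--                 if cheat_end_node not in cheat_end_nodes and waypoint_distances[cheat_start_node] - waypoint_distances[cheat_end_node] - N >= SAVINGS_TARGET:
--                     cheat_end_nodes.add(cheat_end_node)
--                     valid_cheats += 1
--
--     return valid_cheats
-- ===== SOURCE B (Python) =====
-- def check_cheats(waypoint_distances, SAVINGS_TARGET, CHEAT_LENGTH):
--     # Scan all ordered pairs of waypoints once; the Manhattan distance between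
--     # them is the cheat length, so no geometric diamond enumeration is needed.
--     items = list(waypoint_distances.items())
--     total = 0
--     for (sx, sy), ds in items:
--         for (ex, ey), de in items:
--             n = abs(ex - sx) + abs(ey - sy)
--             if 2 <= n <= CHEAT_LENGTH and ds > de and ds - de - n >= SAVINGS_TARGET:
--                 total += 1
--     return total
-- ===== Notes on version B (the rewrite author's own statement) =====
-- stated objective: faster
-- what changed: B drops the geometric enumeration entirely (get_diamond_neighbors, the perimeter loop over N and the cheat_end_nodes dedup set) and instead counts ordered pairs of waypoints whose Manhattan distance n satisfies 2 <= n <= CHEAT_LENGTH together with the distance and savings checks, in one nested scan over the dict items.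
import Mathlib
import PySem

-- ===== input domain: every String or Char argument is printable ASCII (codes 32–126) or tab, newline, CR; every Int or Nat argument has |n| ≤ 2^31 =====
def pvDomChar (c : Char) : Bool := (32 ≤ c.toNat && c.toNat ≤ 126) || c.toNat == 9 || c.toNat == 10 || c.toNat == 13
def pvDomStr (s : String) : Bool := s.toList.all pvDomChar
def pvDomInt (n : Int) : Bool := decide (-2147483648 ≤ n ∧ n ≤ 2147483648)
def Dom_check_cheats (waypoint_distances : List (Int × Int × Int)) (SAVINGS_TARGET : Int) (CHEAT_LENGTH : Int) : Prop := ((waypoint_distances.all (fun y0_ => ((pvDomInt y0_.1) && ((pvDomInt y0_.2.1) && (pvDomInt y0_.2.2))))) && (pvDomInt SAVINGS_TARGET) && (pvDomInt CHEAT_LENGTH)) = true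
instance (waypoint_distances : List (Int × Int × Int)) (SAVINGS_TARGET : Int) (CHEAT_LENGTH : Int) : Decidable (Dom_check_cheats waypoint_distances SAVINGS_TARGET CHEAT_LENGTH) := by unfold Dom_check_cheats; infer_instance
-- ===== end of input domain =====

-- B replaces A's per-perimeter diamond enumeration (with its neighbor sets and dedup set)
-- by a single scan over all ordered pairs of waypoints, comparing their Manhattan distance
-- to the cheat length directly: its cost does not depend on CHEAT_LENGTH (objective: faster,
-- measured; same return value).

-- ===== PORT A =====
-- the dict argument (dict[(int,int), int]) arrives as a List (Int × Int × Int); both ports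
-- first rebuild the Python dict (insertion order, overwrite) from it identically
def pvDictOf (wd : List (Int × Int × Int)) : PySem.Dict (Int × Int) Int :=
  wd.foldl (fun d e => d.insert (e.1, e.2.1) e.2.2) PySem.Dict.empty

-- `waypoint_distances[node]` is ported as `d.getD node 0`: exact, since A only indexes keys
-- that are present (node iterates over keys; new_node is guarded by `in`), so no KeyError
def get_diamond_neighbors (node : Int × Int) (N : Int) (d : PySem.Dict (Int × Int) Int) :
    PySem.Set (Int × Int) :=
  (PySem.List.pyRange (-N) (N + 1) 1).foldl (fun s dx =>
    (PySem.Set.ofList [-(N - |dx|), N - |dx|]).foldl (fun s dy =>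
      let new_node := (node.1 + dx, node.2 + dy)
      if d.contains new_node = true ∧ d.getD node 0 > d.getD new_node 0 then
        PySem.Set.add s new_node
      else s) s)
    PySem.Set.empty

def check_cheats (waypoint_distances : List (Int × Int × Int)) (SAVINGS_TARGET : Int) (CHEAT_LENGTH : Int) : Int :=
  let d := pvDictOf waypoint_distances
  d.keys.foldl (fun valid_cheats cheat_start_node =>
    ((PySem.List.pyRange 2 (CHEAT_LENGTH + 1) 1).foldl (fun st N =>
      (get_diamond_neighbors cheat_start_node N d).foldl (fun st cheat_end_node =>
        if cheat_end_node ∉ st.1 ∧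
            d.getD cheat_start_node 0 - d.getD cheat_end_node 0 - N ≥ SAVINGS_TARGET then
          (PySem.Set.add st.1 cheat_end_node, st.2 + 1)
        else st) st)
      ((PySem.Set.empty : PySem.Set (Int × Int)), valid_cheats)).2) 0

-- ===== PORT B =====
def check_cheats_alt (waypoint_distances : List (Int × Int × Int)) (SAVINGS_TARGET : Int) (CHEAT_LENGTH : Int) : Int :=
  let items := (pvDictOf waypoint_distances).items
  items.foldl (fun total p =>
    items.foldl (fun total q =>
      let n := |q.1.1 - p.1.1| + |q.1.2 - p.1.2|
      if 2 ≤ n ∧ n ≤ CHEAT_LENGTH ∧ p.2 > q.2 ∧ p.2 - q.2 - n ≥ SAVINGS_TARGET then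
        total + 1
      else total) total) 0

-- ===== PRECONDITION & SPEC =====
def Spec_check_cheats (waypoint_distances : List (Int × Int × Int)) (SAVINGS_TARGET : Int) (CHEAT_LENGTH : Int) (out : Int) : Prop := out = check_cheats_alt waypoint_distances SAVINGS_TARGET CHEAT_LENGTH
instance (waypoint_distances : List (Int × Int × Int)) (SAVINGS_TARGET : Int) (CHEAT_LENGTH : Int) (out : Int) : Decidable (Spec_check_cheats waypoint_distances SAVINGS_TARGET CHEAT_LENGTH out) := by unfold Spec_check_cheats; infer_instance

-- ===== CLAIM (what is proved, stated in full; the proofs are below) =====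
def Claim_equal_check_cheats : Prop := ∀ (waypoint_distances : List (Int × Int × Int)) (SAVINGS_TARGET : Int) (CHEAT_LENGTH : Int), Dom_check_cheats waypoint_distances SAVINGS_TARGET CHEAT_LENGTH → Spec_check_cheats waypoint_distances SAVINGS_TARGET CHEAT_LENGTH (check_cheats waypoint_distances SAVINGS_TARGET CHEAT_LENGTH)

-- ===== LEMMAS AND PROOFS =====
-- generic helpers
theorem pv_mem_foldl {β α : Type} [BEq α] [LawfulBEq α] (l : List β) (g : PySem.Set α → β → PySem.Set α)
    (C : β → α → Prop) (hg : ∀ s b x, x ∈ g s b ↔ x ∈ s ∨ C b x) :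
    ∀ (s0 : PySem.Set α) (x : α), x ∈ l.foldl g s0 ↔ x ∈ s0 ∨ ∃ b ∈ l, C b x := by
  induction l with
  | nil => simp
  | cons b t ih =>
    intro s0 x
    rw [List.foldl_cons, ih, hg]
    simp only [List.mem_cons]
    constructor
    · rintro ((h | h) | ⟨b', hb', hc⟩)
      · exact Or.inl h
      · exact Or.inr ⟨b, Or.inl rfl, h⟩
      · exact Or.inr ⟨b', Or.inr hb', hc⟩
    · rintro (h | ⟨b', (rfl | hb'), hc⟩)
      · exact Or.inl (Or.inl h)
      · exact Or.inl (Or.inr hc)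
      · exact Or.inr ⟨b', hb', hc⟩

theorem pv_nodup_foldl {β α : Type} (l : List β) (g : List α → β → List α)
    (hg : ∀ s b, s.Nodup → (g s b).Nodup) :
    ∀ (s0 : List α), s0.Nodup → (l.foldl g s0).Nodup := by
  induction l with
  | nil => intro s0 h; exact h
  | cons b t ih => intro s0 h; exact ih (g s0 b) (hg s0 b h)

theorem mem_gdn (node : Int × Int) (N : Int) (d : PySem.Dict (Int × Int) Int) (x : Int × Int) :
    x ∈ get_diamond_neighbors node N d ↔
      |x.1 - node.1| + |x.2 - node.2| = N ∧ d.contains x = true ∧ d.getD node 0 > d.getD x 0 := by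
  unfold get_diamond_neighbors
  rw [pv_mem_foldl _ _ (fun dx y => ∃ dy ∈ ([-(N - |dx|), N - |dx|] : List Int),
        (d.contains (node.1 + dx, node.2 + dy) = true ∧
          d.getD node 0 > d.getD (node.1 + dx, node.2 + dy) 0) ∧ y = (node.1 + dx, node.2 + dy))
      (fun s dx y => by
        rw [pv_mem_foldl _ _ (fun dy z =>
              (d.contains (node.1 + dx, node.2 + dy) = true ∧
                d.getD node 0 > d.getD (node.1 + dx, node.2 + dy) 0) ∧ z = (node.1 + dx, node.2 + dy))
            (fun s' dy z => by
              by_cases h : d.contains (node.1 + dx, node.2 + dy) = true ∧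
                  d.getD node 0 > d.getD (node.1 + dx, node.2 + dy) 0
              · simp [h, PySem.Set.mem_add]
              · simp [h])]
        simp [PySem.Set.mem_ofList])]
  simp only [PySem.Set.empty, List.not_mem_nil, false_or, PySem.List.mem_pyRange_one, List.mem_cons,
    List.not_mem_nil, or_false]
  constructor
  · rintro ⟨dx, ⟨h1, h2⟩, dy, hdy, ⟨hc, hgt⟩, rfl⟩
    refine ⟨?_, hc, hgt⟩
    simp only [add_sub_cancel_left]
    rcases abs_cases dx with ⟨e1, _⟩ | ⟨e1, _⟩ <;> rcases hdy with rfl | rfl <;>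
      rcases abs_cases (-(N - |dx|)) with ⟨e2, _⟩ | ⟨e2, _⟩ <;>
      rcases abs_cases (N - |dx|) with ⟨e3, _⟩ | ⟨e3, _⟩ <;> omega
  · rintro ⟨hman, hc, hgt⟩
    refine ⟨x.1 - node.1, ⟨?_, ?_⟩, x.2 - node.2, ?_, ?_⟩
    · rcases abs_cases (x.1 - node.1) with ⟨e1, _⟩ | ⟨e1, _⟩ <;>
        rcases abs_cases (x.2 - node.2) with ⟨e2, _⟩ | ⟨e2, _⟩ <;> omega
    · rcases abs_cases (x.1 - node.1) with ⟨e1, _⟩ | ⟨e1, _⟩ <;>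
        rcases abs_cases (x.2 - node.2) with ⟨e2, _⟩ | ⟨e2, _⟩ <;> omega
    · rcases abs_cases (x.1 - node.1) with ⟨e1, _⟩ | ⟨e1, _⟩ <;>
        rcases abs_cases (x.2 - node.2) with ⟨e2, _⟩ | ⟨e2, _⟩ <;> simp <;> omega
    · have hx : (node.1 + (x.1 - node.1), node.2 + (x.2 - node.2)) = x := by
        apply Prod.ext <;> simp
      rw [hx]
      exact ⟨⟨hc, hgt⟩, rfl⟩
theorem nodup_gdn (node : Int × Int) (N : Int) (d : PySem.Dict (Int × Int) Int) :
    (get_diamond_neighbors node N d).Nodup := by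
  unfold get_diamond_neighbors
  apply pv_nodup_foldl
  · intro s dx hs
    apply pv_nodup_foldl
    · intro s' dy hs'
      by_cases h : d.contains (node.1 + dx, node.2 + dy) = true ∧
          d.getD node 0 > d.getD (node.1 + dx, node.2 + dy) 0
      · simpa [h] using PySem.Set.nodup_add s' (node.1 + dx, node.2 + dy) hs'
      · simpa [h] using hs'
    · exact hs
  · exact List.nodup_nil

theorem pv_level_fold (d : PySem.Dict (Int × Int) Int) (s : Int × Int) (T N : Int) :
    ∀ (es : List (Int × Int)) (ends : PySem.Set (Int × Int)) (acc : Int),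
      es.Nodup → (∀ e ∈ es, e ∉ ends) →
      ∃ ends',
        es.foldl (fun st e =>
            if e ∉ st.1 ∧ d.getD s 0 - d.getD e 0 - N ≥ T then
              (PySem.Set.add st.1 e, st.2 + 1) else st) (ends, acc)
          = (ends', acc + ((es.countP fun e => decide (d.getD s 0 - d.getD e 0 - N ≥ T)) : Int))
          ∧ ∀ x ∈ ends', x ∈ ends ∨ x ∈ es := by
  intro es
  induction es with
  | nil => intro ends acc _ _; exact ⟨ends, by simp, fun x hx => Or.inl hx⟩
  | cons e t ih =>
    intro ends acc hnd hdis
    have he : e ∉ ends := hdis e (List.mem_cons_self ..)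
    rw [List.foldl_cons]
    by_cases hs : d.getD s 0 - d.getD e 0 - N ≥ T
    · rw [if_pos ⟨he, hs⟩, PySem.Set.add_of_not_mem he]
      obtain ⟨ends', heq, hsub⟩ := ih (ends ++ [e]) (acc + 1) hnd.of_cons
        (by
          intro e' he'
          simp only [List.mem_append, List.mem_singleton]
          rintro (h | rfl)
          · exact hdis e' (List.mem_cons_of_mem _ he') h
          · exact (List.nodup_cons.mp hnd).1 he')
      refine ⟨ends', ?_, ?_⟩
      · have hd : (decide (d.getD s 0 - d.getD e 0 - N ≥ T)) = true := decide_eq_true hs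
        rw [heq, List.countP_cons, hd, if_pos rfl]
        congr 1
        push_cast
        ring
      · intro x hx
        rcases hsub x hx with h | h
        · rcases List.mem_append.mp h with h | h
          · exact Or.inl h
          · exact Or.inr (List.mem_cons.mpr (Or.inl (List.mem_singleton.mp h)))
        · exact Or.inr (List.mem_cons_of_mem _ h)
    · rw [if_neg (by tauto)]
      obtain ⟨ends', heq, hsub⟩ := ih ends acc hnd.of_cons
        (fun e' he' => hdis e' (List.mem_cons_of_mem _ he'))
      refine ⟨ends', ?_, fun x hx => (hsub x hx).imp id (List.mem_cons_of_mem _)⟩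
      rw [heq, List.countP_cons]
      congr 2
      simp [hs]

theorem pv_countP_eq {α : Type} [DecidableEq α] (l₁ l₂ : List α) (p q : α → Bool)
    (h₁ : l₁.Nodup) (h₂ : l₂.Nodup)
    (h : ∀ x, (x ∈ l₁ ∧ p x = true) ↔ (x ∈ l₂ ∧ q x = true)) :
    l₁.countP p = l₂.countP q := by
  rw [List.countP_eq_length_filter, List.countP_eq_length_filter]
  apply List.Perm.length_eq
  rw [List.perm_ext_iff_of_nodup (h₁.filter _) (h₂.filter _)]
  intro x
  simp only [List.mem_filter]
  exact h x

theorem pv_countP_split {α : Type} (l : List α) (p q r : α → Bool)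
    (h : ∀ x ∈ l, p x = (q x || r x)) (hd : ∀ x ∈ l, ¬(q x = true ∧ r x = true)) :
    l.countP p = l.countP q + l.countP r := by
  induction l with
  | nil => simp
  | cons a t ih =>
    simp only [List.countP_cons]
    rw [ih (fun x hx => h x (List.mem_cons_of_mem _ hx))
        (fun x hx => hd x (List.mem_cons_of_mem _ hx)),
      h a (List.mem_cons_self ..)]
    have := hd a (List.mem_cons_self ..)
    cases hq : q a <;> cases hr : r a <;> simp [hq, hr] at this ⊢ <;> omega
theorem pv_levels (d : PySem.Dict (Int × Int) Int) (hk : d.keys.Nodup) (s : Int × Int) (T L : Int) :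
    ∀ (fuel : Nat) (N : Int), (L + 1 - N).toNat = fuel → 2 ≤ N →
    ∀ (ends : PySem.Set (Int × Int)) (acc : Int),
      (∀ x ∈ ends, |x.1 - s.1| + |x.2 - s.2| < N) →
      ((PySem.List.pyRange N (L + 1) 1).foldl (fun st M =>
          (get_diamond_neighbors s M d).foldl (fun st e =>
            if e ∉ st.1 ∧ d.getD s 0 - d.getD e 0 - M ≥ T then
              (PySem.Set.add st.1 e, st.2 + 1) else st) st) (ends, acc)).2
        = acc + ((d.keys.countP fun b => decide (N ≤ |b.1 - s.1| + |b.2 - s.2| ∧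
            |b.1 - s.1| + |b.2 - s.2| ≤ L ∧ d.getD s 0 > d.getD b 0 ∧
            d.getD s 0 - d.getD b 0 - (|b.1 - s.1| + |b.2 - s.2|) ≥ T)) : Int) := by
  intro fuel
  induction fuel with
  | zero =>
    intro N hf h2 ends acc hends
    rw [PySem.List.pyRange_one_eq_nil (by omega)]
    have hz : (d.keys.countP fun b => decide (N ≤ |b.1 - s.1| + |b.2 - s.2| ∧
        |b.1 - s.1| + |b.2 - s.2| ≤ L ∧ d.getD s 0 > d.getD b 0 ∧
        d.getD s 0 - d.getD b 0 - (|b.1 - s.1| + |b.2 - s.2|) ≥ T)) = 0 := by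
      apply List.countP_eq_zero.mpr
      intro b _
      simp only [decide_eq_true_eq]
      omega
    rw [hz]
    simp
  | succ f ih =>
    intro N hf h2 ends acc hends
    have hNL : N ≤ L := by omega
    rw [PySem.List.pyRange_one_cons (by omega : N < L + 1), List.foldl_cons]
    obtain ⟨ends', heq, hsub⟩ := pv_level_fold d s T N (get_diamond_neighbors s N d) ends acc
      (nodup_gdn s N d)
      (fun e he hmem => by
        have h1 := (mem_gdn s N d e).mp he
        have h2' := hends e hmem
        omega)
    rw [heq]
    rw [ih (N + 1) (by omega) (by omega) ends' _ (fun x hx => by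
      rcases hsub x hx with h | h
      · have := hends x h; omega
      · have := (mem_gdn s N d x).mp h; omega)]
    have hcnt : ((get_diamond_neighbors s N d).countP fun e =>
          decide (d.getD s 0 - d.getD e 0 - N ≥ T))
        = d.keys.countP (fun b => decide (|b.1 - s.1| + |b.2 - s.2| = N ∧
            d.getD s 0 > d.getD b 0 ∧ d.getD s 0 - d.getD b 0 - N ≥ T)) := by
      apply pv_countP_eq _ _ _ _ (nodup_gdn s N d) hk
      intro x
      simp only [decide_eq_true_eq, mem_gdn, ← PySem.Dict.contains_iff_mem_keys]
      tauto
    have hsplit : (d.keys.countP fun b => decide (N ≤ |b.1 - s.1| + |b.2 - s.2| ∧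
        |b.1 - s.1| + |b.2 - s.2| ≤ L ∧ d.getD s 0 > d.getD b 0 ∧
        d.getD s 0 - d.getD b 0 - (|b.1 - s.1| + |b.2 - s.2|) ≥ T))
        = (d.keys.countP (fun b => decide (|b.1 - s.1| + |b.2 - s.2| = N ∧
            d.getD s 0 > d.getD b 0 ∧ d.getD s 0 - d.getD b 0 - N ≥ T)))
          + (d.keys.countP fun b => decide (N + 1 ≤ |b.1 - s.1| + |b.2 - s.2| ∧
            |b.1 - s.1| + |b.2 - s.2| ≤ L ∧ d.getD s 0 > d.getD b 0 ∧
            d.getD s 0 - d.getD b 0 - (|b.1 - s.1| + |b.2 - s.2|) ≥ T)) := by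
      apply pv_countP_split
      · intro b _
        rw [← Bool.decide_or, decide_eq_decide]
        generalize |b.1 - s.1| + |b.2 - s.2| = m
        constructor
        · rintro ⟨u1, u2, u3, u4⟩
          by_cases hm : m = N
          · subst hm; exact Or.inl ⟨rfl, u3, u4⟩
          · exact Or.inr ⟨by omega, u2, u3, u4⟩
        · rintro (⟨hm, u3, u4⟩ | ⟨u1, u2, u3, u4⟩)
          · subst hm; exact ⟨le_refl _, hNL, u3, u4⟩
          · exact ⟨by omega, u2, u3, u4⟩
      · intro b _
        simp only [decide_eq_true_eq, not_and]
        intro ⟨hm, _⟩ 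
        omega
    rw [hcnt, hsplit]
    push_cast
    ring
theorem pv_keys_nodup (wd : List (Int × Int × Int)) : (pvDictOf wd).keys.Nodup := by
  unfold pvDictOf
  exact PySem.Dict.nodup_keys_foldl_insert_key wd (fun e => (e.1, e.2.1)) (fun d e => e.2.2)
    PySem.Dict.empty PySem.Dict.nodup_keys_empty

theorem pv_check_cheats_eq (wd : List (Int × Int × Int)) (T L : Int) :
    check_cheats wd T L = check_cheats_alt wd T L := by
  have hk := pv_keys_nodup wd
  simp only [check_cheats, check_cheats_alt]
  rw [PySem.Dict.items_eq_map_keys (pvDictOf wd) hk 0]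
  simp only [List.foldl_map]
  apply List.foldl_ext
  intro acc s hs
  rw [pv_levels (pvDictOf wd) hk s T L ((L + 1 - 2).toNat) 2 rfl (le_refl 2) PySem.Set.empty acc
    (by intro x hx; simp [PySem.Set.empty] at hx)]
  rw [PySem.List.foldl_ite_add_one]

-- ===== VERDICT (by name: the statement is the Claim_ definition above) =====
theorem check_cheats_spec : Claim_equal_check_cheats := by
  intro waypoint_distances SAVINGS_TARGET CHEAT_LENGTH _
  unfold Spec_check_cheats
  exact pv_check_cheats_eq waypoint_distances SAVINGS_TARGET CHEAT_LENGTH
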